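-- pv_equiv track=rewrite | github.com/chauta03/crypto483 | project1/decode.py | brute_force_shift_decoder
-- ===== SOURCE A (Python) =====
-- import string
--
-- def brute_force_shift_decoder(plaintext, cipher):
--     for i in range(26):
--         shift = i
--         shift_dict = {}
--         for j in range(26):
--             shift_dict[string.ascii_uppercase[j]] = string.ascii_uppercase[(j + shift) % 26]
--         decoded = "".join(shift_dict.get(x, x) for x in cipher)
--         if decoded == plaintext:
--             return shift_dict
--     return None
-- ===== SOURCE B (Python) =====
-- def brute_force_shift_decoder(plaintext, cipher):
--     # Derive the single candidate shift from the first uppercase cipher letter,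
--     # verify it in one pass, and build the mapping once (instead of trying all 26).
--     if len(plaintext) != len(cipher):
--         return None
--     shift = 0
--     for p, c in zip(plaintext, cipher):
--         if 'A' <= c <= 'Z':
--             if not ('A' <= p <= 'Z'):
--                 return None
--             shift = (ord(p) - ord(c)) % 26
--             break
--     for p, c in zip(plaintext, cipher):
--         if 'A' <= c <= 'Z':
--             if chr((ord(c) - 65 + shift) % 26 + 65) != p:
--                 return None
--         elif p != c:
--             return None
--     return {chr(65 + j): chr(65 + (j + shift) % 26) for j in range(26)}
-- ===== Notes on version B (the rewrite author's own statement) =====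
-- stated objective: faster
-- what changed: Instead of trying all 26 shifts (rebuilding a 26-entry dict and re-decoding the whole cipher each time), B derives the only possible shift from the first uppercase cipher letter, verifies it in a single pass, and builds the mapping once.
import Mathlib
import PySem

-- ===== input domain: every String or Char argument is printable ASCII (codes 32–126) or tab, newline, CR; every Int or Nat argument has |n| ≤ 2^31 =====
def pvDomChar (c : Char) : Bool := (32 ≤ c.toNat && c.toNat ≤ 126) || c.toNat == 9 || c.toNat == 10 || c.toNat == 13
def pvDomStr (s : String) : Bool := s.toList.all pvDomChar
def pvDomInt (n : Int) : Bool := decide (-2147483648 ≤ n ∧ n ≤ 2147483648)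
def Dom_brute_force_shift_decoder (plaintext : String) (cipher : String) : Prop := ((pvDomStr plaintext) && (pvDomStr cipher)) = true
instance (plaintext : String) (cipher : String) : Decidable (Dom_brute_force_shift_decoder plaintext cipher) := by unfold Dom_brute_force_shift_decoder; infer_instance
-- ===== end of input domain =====

-- B derives the single possible shift from the first uppercase cipher letter and verifies it in
-- one pass, instead of A's trying all 26 shifts with a fresh dict and a full re-decode each time.

-- ===== PORT A =====
-- string.ascii_uppercase, as Python's sequence of length-1 strings (s[j] yields a 1-char str)
def pvUppers : List String :=
  ["A","B","C","D","E","F","G","H","I","J","K","L","M","N","O","P","Q","R","S","T","U","V","W","X","Y","Z"]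

-- inner loop: for j in range(26): shift_dict[U[j]] = U[(j + shift) % 26]
-- (both indices are provably in 0..25, so pyGetD's default "" is never reached)
def pvShiftDict (shift : Int) : PySem.Dict String String :=
  (PySem.List.pyRange 0 26 1).foldl
    (fun d j => d.insert (PySem.List.pyGetD pvUppers j "")
                         (PySem.List.pyGetD pvUppers (PySem.Int.mod (j + shift) 26) ""))
    PySem.Dict.empty

-- decoded = "".join(shift_dict.get(x, x) for x in cipher)   (x is a 1-char str)
def pvDecode (d : PySem.Dict String String) (cipher : String) : String :=
  PySem.Str.join "" (cipher.toList.map (fun x => d.getD (String.ofList [x]) (String.ofList [x])))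

-- for i in range(26): … if decoded == plaintext: return shift_dict / fall through: return None
def pvALoop (plaintext cipher : String) : List Int → Option (List (String × String))
  | [] => none
  | i :: rest =>
    let shift_dict := pvShiftDict i
    if pvDecode shift_dict cipher = plaintext then some shift_dict.items
    else pvALoop plaintext cipher rest

def brute_force_shift_decoder (plaintext : String) (cipher : String) : Option (List (String × String)) :=
  pvALoop plaintext cipher (PySem.List.pyRange 0 26 1)

-- ===== PORT B =====
def pvIsUpper (c : Char) : Bool := 'A' ≤ c && c ≤ 'Z'    -- 'A' <= c <= 'Z'

def pvChr (n : Int) : Char := Char.ofNat n.toNat         -- chr(n); only applied at 65..90 here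

-- B's first loop: the candidate shift from the first uppercase cipher letter
-- (some 0 = loop ended without break, shift keeps its initial 0; none = return None)
def pvFindShift : List (Char × Char) → Option Int
  | [] => some 0
  | (p, c) :: rest =>
    if pvIsUpper c then
      if !pvIsUpper p then none
      else some (PySem.Int.mod ((p.toNat : Int) - (c.toNat : Int)) 26)
    else pvFindShift rest

-- B's second loop: verify the shift at every position
def pvVerify (shift : Int) : List (Char × Char) → Bool
  | [] => true
  | (p, c) :: rest =>
    if pvIsUpper c then
      if pvChr (PySem.Int.mod ((c.toNat : Int) - 65 + shift) 26 + 65) ≠ p then false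
      else pvVerify shift rest
    else if p ≠ c then false else pvVerify shift rest

-- {chr(65 + j): chr(65 + (j + shift) % 26) for j in range(26)}
def pvDictB (shift : Int) : PySem.Dict String String :=
  (PySem.List.pyRange 0 26 1).foldl
    (fun d j => d.insert (String.ofList [pvChr (65 + j)])
                         (String.ofList [pvChr (65 + PySem.Int.mod (j + shift) 26)]))
    PySem.Dict.empty

def brute_force_shift_decoder_alt (plaintext : String) (cipher : String) : Option (List (String × String)) :=
  if PySem.Str.len plaintext ≠ PySem.Str.len cipher then none
  else
    match pvFindShift (plaintext.toList.zip cipher.toList) with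
    | none => none
    | some shift =>
      if pvVerify shift (plaintext.toList.zip cipher.toList) then some (pvDictB shift).items
      else none

-- ===== PRECONDITION & SPEC =====
def Spec_brute_force_shift_decoder (plaintext : String) (cipher : String) (out : Option (List (String × String))) : Prop := out = brute_force_shift_decoder_alt plaintext cipher
instance (plaintext : String) (cipher : String) (out : Option (List (String × String))) : Decidable (Spec_brute_force_shift_decoder plaintext cipher out) := by unfold Spec_brute_force_shift_decoder; infer_instance

-- ===== CLAIM (what is proved, stated in full; the proofs are below) =====
def Claim_equal_brute_force_shift_decoder : Prop := ∀ (plaintext : String) (cipher : String), Dom_brute_force_shift_decoder plaintext cipher → Spec_brute_force_shift_decoder plaintext cipher (brute_force_shift_decoder plaintext cipher)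

-- ===== LEMMAS AND PROOFS =====

-- the per-character action of the shift-`i` substitution
def pvG (i : Int) (x : Char) : Char :=
  if pvIsUpper x then pvChr (PySem.Int.mod ((x.toNat : Int) - 65 + i) 26 + 65) else x

theorem pvIsUpper_iff (x : Char) : pvIsUpper x = true ↔ 65 ≤ x.toNat ∧ x.toNat ≤ 90 := by
  simp only [pvIsUpper, Bool.and_eq_true, decide_eq_true_eq, Char.le_def, UInt32.le_iff_toNat_le]
  exact Iff.rfl

theorem pvChar_eq_of_toNat {a b : Char} (h : a.toNat = b.toNat) : a = b := by
  apply Char.ext; exact UInt32.toNat_inj.mp h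

theorem pvToNat_ofNat (n : Nat) (h2 : 65 ≤ n) (h : n ≤ 90) : (Char.ofNat n).toNat = n := by
  have hv : n < 55296 := by omega
  simp only [Char.ofNat, Char.ofNatAux, hv, Or.inl, dite_true, Char.toNat, UInt32.toNat]
  simp [BitVec.toNat_ofNatLT]

theorem pvChr_toNat (n : Int) (h2 : 65 ≤ n) (h : n ≤ 90) : (pvChr n).toNat = n.toNat := by
  unfold pvChr; exact pvToNat_ofNat n.toNat (by omega) (by omega)

-- the shifted character is uppercase, with the expected code
theorem pvChr_shift_toNat (a i : Int) :
    ((pvChr (PySem.Int.mod (a - 65 + i) 26 + 65)).toNat : Int)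
      = PySem.Int.mod (a - 65 + i) 26 + 65 := by
  have h1 := PySem.Int.mod_nonneg (a - 65 + i) (b := 26) (by norm_num)
  have h2 := PySem.Int.mod_lt (a - 65 + i) (b := 26) (by norm_num)
  rw [pvChr_toNat _ (by omega) (by omega)]
  omega

theorem pvChr_shift_upper (a i : Int) :
    pvIsUpper (pvChr (PySem.Int.mod (a - 65 + i) 26 + 65)) = true := by
  have h1 := PySem.Int.mod_nonneg (a - 65 + i) (b := 26) (by norm_num)
  have h2 := PySem.Int.mod_lt (a - 65 + i) (b := 26) (by norm_num)
  rw [pvIsUpper_iff]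
  have := pvChr_shift_toNat a i
  omega

theorem pvUppers_getD (j : Nat) (h : j < 26) :
    PySem.List.pyGetD pvUppers (j : Int) "" = String.ofList [Char.ofNat (65 + j)] := by
  interval_cases j <;> rfl

theorem pvShiftDict_items (i : Int) :
    (pvShiftDict i).items
      = (PySem.List.pyRange 0 26 1).map
          (fun j => (PySem.List.pyGetD pvUppers j "",
                     PySem.List.pyGetD pvUppers (PySem.Int.mod (j + i) 26) "")) := by
  unfold pvShiftDict
  have h := PySem.Dict.items_foldl_insert_fresh (PySem.List.pyRange 0 26 1)
    (fun j => PySem.List.pyGetD pvUppers j "")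
    (fun j => PySem.List.pyGetD pvUppers (PySem.Int.mod (j + i) 26) "")
    PySem.Dict.empty (by intro a _; simp) (by decide)
  simpa using h

theorem pvShiftDict_keys_nodup (i : Int) : (pvShiftDict i).keys.Nodup := by
  unfold pvShiftDict
  exact PySem.Dict.nodup_keys_foldl_insert_key _ _ _ _ PySem.Dict.nodup_keys_empty

theorem pvUppers_mem_upper (x : Char) (hmem : String.ofList [x] ∈ pvUppers) : pvIsUpper x = true := by
  simp only [pvUppers, List.mem_cons, List.not_mem_nil, or_false] at hmem
  rcases hmem with h|h|h|h|h|h|h|h|h|h|h|h|h|h|h|h|h|h|h|h|h|h|h|h|h|h <;>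
    (have hx := congrArg String.toList h; simp at hx; subst hx; rfl)

-- the dict lookup acts as pvG on single-character strings
theorem pvShiftDict_getD (i : Int) (hi : 0 ≤ i) (x : Char) :
    (pvShiftDict i).getD (String.ofList [x]) (String.ofList [x]) = String.ofList [pvG i x] := by
  by_cases hu : pvIsUpper x = true
  · obtain ⟨h65, h90⟩ := (pvIsUpper_iff x).mp hu
    have hj0lt : x.toNat - 65 < 26 := by omega
    set j0 : Nat := x.toNat - 65 with hj0
    have hkey : PySem.List.pyGetD pvUppers (j0 : Int) "" = String.ofList [x] := by
      rw [pvUppers_getD j0 hj0lt]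
      have h : (65 + j0) = x.toNat := by omega
      rw [h, Char.ofNat_toNat]
    have hmodcast : PySem.Int.mod ((j0 : Int) + i) 26 = ((j0 + i.toNat) % 26 : Nat) := by
      rw [PySem.Int.mod_eq_emod_of_pos (by norm_num : (0:Int) < 26)]
      omega
    have hval : PySem.List.pyGetD pvUppers (PySem.Int.mod ((j0 : Int) + i) 26) ""
        = String.ofList [Char.ofNat (65 + (j0 + i.toNat) % 26)] := by
      rw [hmodcast, pvUppers_getD _ (Nat.mod_lt _ (by norm_num))]
    have hmem : (String.ofList [x],
        String.ofList [Char.ofNat (65 + (j0 + i.toNat) % 26)]) ∈ (pvShiftDict i).items := by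
      rw [pvShiftDict_items]
      have hjr : ((j0 : Int)) ∈ PySem.List.pyRange 0 26 1 := by
        rw [PySem.List.mem_pyRange_one]
        constructor
        · positivity
        · exact_mod_cast hj0lt
      exact List.mem_map.mpr ⟨(j0 : Int), hjr, by simp only [hkey, hval]⟩
    rw [PySem.Dict.getD_of_mem_items _ hmem (pvShiftDict_keys_nodup i)]
    unfold pvG
    rw [if_pos hu]
    have hch := pvChr_shift_toNat (x.toNat : Int) i
    have h1 : (Char.ofNat (65 + (j0 + i.toNat) % 26)).toNat = 65 + (j0 + i.toNat) % 26 :=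
      pvToNat_ofNat _ (by omega)
        (by have := Nat.mod_lt (j0 + i.toNat) (y := 26) (by norm_num); omega)
    have harith : PySem.Int.mod ((x.toNat : Int) - 65 + i) 26 = ((j0 + i.toNat) % 26 : Nat) := by
      rw [PySem.Int.mod_eq_emod_of_pos (by norm_num : (0:Int) < 26)]
      omega
    exact congrArg (fun c => String.ofList [c]) (pvChar_eq_of_toNat (by omega))
  · have hkeys : (pvShiftDict i).keys
        = (PySem.List.pyRange 0 26 1).map (fun j => PySem.List.pyGetD pvUppers j "") := by
      have h : (pvShiftDict i).keys = (pvShiftDict i).items.map (·.1) := rfl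
      rw [h, pvShiftDict_items, List.map_map]
      rfl
    have hmapu : (PySem.List.pyRange 0 26 1).map (fun j => PySem.List.pyGetD pvUppers j "")
        = pvUppers := by decide
    have hnc : (pvShiftDict i).contains (String.ofList [x]) = false := by
      rw [PySem.Dict.contains_eq_decide_mem_keys, hkeys, hmapu]
      simp only [decide_eq_false_iff_not]
      intro hmem
      exact hu (pvUppers_mem_upper x hmem)
    rw [PySem.Dict.getD_of_not_contains _ _ hnc]
    unfold pvG
    rw [if_neg (by simp [hu])]

-- A's decode is the character-wise substitution pvG
theorem pvDecode_eq (i : Int) (hi : 0 ≤ i) (cipher : String) :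
    pvDecode (pvShiftDict i) cipher = String.ofList (cipher.toList.map (pvG i)) := by
  unfold pvDecode
  have h1 : cipher.toList.map (fun x => (pvShiftDict i).getD (String.ofList [x]) (String.ofList [x]))
      = (cipher.toList.map (pvG i)).map (fun c => String.ofList [c]) := by
    rw [List.map_map]
    exact List.map_congr_left (fun x _ => pvShiftDict_getD i hi x)
  rw [String.ext_iff, h1]
  simp only [PySem.Str.toList_join, String.toList_ofList, List.map_map]
  have h2 : (String.toList ∘ (fun c => String.ofList [c]) ∘ pvG i)
      = (fun c => [c]) ∘ pvG i := funext (fun c => by simp)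
  rw [h2, ← List.map_map]
  exact PySem.Chars.join_nil_singletons _

-- verify is the pointwise condition
theorem pvVerify_iff (i : Int) : ∀ (P C : List Char), P.length = C.length →
    (pvVerify i (P.zip C) = true ↔ C.map (pvG i) = P) := by
  intro P
  induction P with
  | nil =>
    intro C hC
    cases C with
    | nil => simp [pvVerify]
    | cons c cs => simp at hC
  | cons p ps ih =>
    intro C hC
    cases C with
    | nil => simp at hC
    | cons c cs =>
      have hlen : ps.length = cs.length := by simpa using hC
      rw [List.zip_cons_cons, List.map_cons]
      show pvVerify i ((p, c) :: ps.zip cs) = true ↔ _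
      unfold pvVerify
      by_cases hu : pvIsUpper c = true
      · rw [if_pos hu]
        have hg : pvG i c = pvChr (PySem.Int.mod ((c.toNat : Int) - 65 + i) 26 + 65) := by
          unfold pvG; rw [if_pos hu]
        by_cases he : pvChr (PySem.Int.mod ((c.toNat : Int) - 65 + i) 26 + 65) = p
        · rw [if_neg (not_not_intro he), ih cs hlen]
          constructor
          · intro h
            rw [hg, he, h]
          · intro h
            exact (List.cons.injEq _ _ _ _ ▸ h).2
        · rw [if_pos he]
          constructor
          · intro h
            exact absurd h (by simp)
          · intro h
            have := (List.cons.injEq _ _ _ _ ▸ h).1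
            rw [hg] at this
            exact absurd this he
      · rw [if_neg hu]
        have hg : pvG i c = c := by unfold pvG; rw [if_neg hu]
        by_cases he : p = c
        · rw [if_neg (not_not_intro he), ih cs hlen]
          constructor
          · intro h
            rw [hg, ← he, h]
          · intro h
            exact (List.cons.injEq _ _ _ _ ▸ h).2
        · rw [if_pos he]
          constructor
          · intro h
            exact absurd h (by simp)
          · intro h
            have := (List.cons.injEq _ _ _ _ ▸ h).1
            rw [hg] at this
            exact absurd this.symm he


theorem pvDecode_eq_iff (i : Int) (hi : 0 ≤ i) (plaintext cipher : String) :
    pvDecode (pvShiftDict i) cipher = plaintext ↔ cipher.toList.map (pvG i) = plaintext.toList := by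
  rw [pvDecode_eq i hi, String.ext_iff]
  simp

theorem pvALoop_none (plaintext cipher : String) :
    ∀ l : List Int, (∀ i ∈ l, pvDecode (pvShiftDict i) cipher ≠ plaintext) →
    pvALoop plaintext cipher l = none := by
  intro l
  induction l with
  | nil => intro _; rfl
  | cons i rest ih =>
    intro h
    unfold pvALoop
    rw [if_neg (h i (List.mem_cons_self ..))]
    exact ih (fun j hj => h j (List.mem_cons_of_mem _ hj))

theorem pvALoop_found (plaintext cipher : String) (s : Int) :
    ∀ l : List Int, (∀ i ∈ l, (pvDecode (pvShiftDict i) cipher = plaintext ↔ i = s)) →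
    pvALoop plaintext cipher l = if s ∈ l then some (pvShiftDict s).items else none := by
  intro l
  induction l with
  | nil => intro _; simp [pvALoop]
  | cons i rest ih =>
    intro h
    unfold pvALoop
    by_cases hd : pvDecode (pvShiftDict i) cipher = plaintext
    · have hi : i = s := (h i (List.mem_cons_self ..)).mp hd
      rw [if_pos hd, hi, if_pos (List.mem_cons_self ..)]
    · have hi : i ≠ s := fun he => hd ((h i (List.mem_cons_self ..)).mpr he)
      rw [if_neg hd, ih (fun j hj => h j (List.mem_cons_of_mem _ hj))]
      by_cases hm : s ∈ rest
      · rw [if_pos hm, if_pos (List.mem_cons_of_mem _ hm)]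
      · rw [if_neg hm, if_neg (by
          simp only [List.mem_cons, not_or]
          exact ⟨fun he => hi he.symm, hm⟩)]

theorem pvVerify_mem (i : Int) : ∀ Z : List (Char × Char), pvVerify i Z = true →
    ∀ pc ∈ Z, (pvIsUpper pc.2 = true →
      pvChr (PySem.Int.mod ((pc.2.toNat : Int) - 65 + i) 26 + 65) = pc.1) := by
  intro Z
  induction Z with
  | nil => intro _ pc hpc; simp at hpc
  | cons hd tl ih =>
    obtain ⟨p, c⟩ := hd
    intro hv pc hpc hup
    unfold pvVerify at hv
    rcases List.mem_cons.mp hpc with he | hm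
    · subst he
      rw [if_pos hup] at hv
      by_cases hc : pvChr (PySem.Int.mod ((c.toNat : Int) - 65 + i) 26 + 65) = p
      · exact hc
      · rw [if_pos hc] at hv; exact absurd hv (by simp)
    · by_cases hu : pvIsUpper c = true
      · rw [if_pos hu] at hv
        by_cases hc : pvChr (PySem.Int.mod ((c.toNat : Int) - 65 + i) 26 + 65) = p
        · rw [if_neg (not_not_intro hc)] at hv
          exact ih hv pc hm hup
        · rw [if_pos hc] at hv; exact absurd hv (by simp)
      · rw [if_neg hu] at hv
        by_cases hc : p = c
        · rw [if_neg (not_not_intro hc)] at hv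
          exact ih hv pc hm hup
        · rw [if_pos hc] at hv; exact absurd hv (by simp)

theorem pvFindShift_none_verify (i : Int) : ∀ Z, pvFindShift Z = none → pvVerify i Z = false := by
  intro Z
  induction Z with
  | nil => intro h; exact absurd h (by simp [pvFindShift])
  | cons hd tl ih =>
    obtain ⟨p, c⟩ := hd
    intro h
    unfold pvFindShift at h
    unfold pvVerify
    by_cases hu : pvIsUpper c = true
    · rw [if_pos hu] at h ⊢
      by_cases hp : pvIsUpper p = true
      · rw [if_neg (by simp [hp])] at h; exact absurd h (by simp)
      · have hne : pvChr (PySem.Int.mod ((c.toNat : Int) - 65 + i) 26 + 65) ≠ p := by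
          intro he
          exact hp (he ▸ pvChr_shift_upper (c.toNat : Int) i)
        rw [if_pos hne]
    · rw [if_neg hu] at h ⊢
      by_cases hc : p = c
      · rw [if_neg (not_not_intro hc)]
        exact ih h
      · rw [if_pos hc]

theorem pvFindShift_some : ∀ Z s, pvFindShift Z = some s →
    (s = 0 ∧ ∀ pc ∈ Z, pvIsUpper pc.2 = false)
    ∨ (∃ pc ∈ Z, pvIsUpper pc.2 = true ∧ pvIsUpper pc.1 = true ∧
        s = PySem.Int.mod ((pc.1.toNat : Int) - (pc.2.toNat : Int)) 26) := by
  intro Z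
  induction Z with
  | nil =>
    intro s h
    left
    refine ⟨by simpa [pvFindShift] using h.symm, by simp⟩
  | cons hd tl ih =>
    obtain ⟨p, c⟩ := hd
    intro s h
    unfold pvFindShift at h
    by_cases hu : pvIsUpper c = true
    · rw [if_pos hu] at h
      by_cases hp : pvIsUpper p = true
      · rw [if_neg (by simp [hp])] at h
        right
        exact ⟨(p, c), List.mem_cons_self .., hu, hp, (Option.some.injEq .. ▸ h).symm⟩
      · rw [if_pos (by simp [hp])] at h
        exact absurd h (by simp)
    · rw [if_neg hu] at h
      rcases ih s h with ⟨h0, hall⟩ | ⟨pc, hm, h1, h2, h3⟩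
      · left
        refine ⟨h0, fun pc hpc => ?_⟩
        rcases List.mem_cons.mp hpc with he | hm
        · subst he; simpa using hu
        · exact hall pc hm
      · right
        exact ⟨pc, List.mem_cons_of_mem _ hm, h1, h2, h3⟩

theorem pvFindShift_bounds : ∀ Z s, pvFindShift Z = some s → 0 ≤ s ∧ s < 26 := by
  intro Z s h
  rcases pvFindShift_some Z s h with ⟨h0, _⟩ | ⟨pc, _, _, _, h3⟩
  · omega
  · subst h3
    exact ⟨PySem.Int.mod_nonneg _ (by norm_num), PySem.Int.mod_lt _ (by norm_num)⟩

theorem pvUnique (i : Int) (hi0 : 0 ≤ i) (hi26 : i < 26) (p c : Char)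
    (hchr : pvChr (PySem.Int.mod ((c.toNat : Int) - 65 + i) 26 + 65) = p) :
    i = PySem.Int.mod ((p.toNat : Int) - (c.toNat : Int)) 26 := by
  have h1 := pvChr_shift_toNat (c.toNat : Int) i
  have h2 := congrArg Char.toNat hchr
  rw [h2] at h1
  rw [PySem.Int.mod_eq_emod_of_pos (by norm_num : (0:Int) < 26)] at h1 ⊢
  omega

theorem pvVerify_const (i j : Int) : ∀ Z, (∀ pc ∈ Z, pvIsUpper pc.2 = false) →
    pvVerify i Z = pvVerify j Z := by
  intro Z
  induction Z with
  | nil => intro _; rfl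
  | cons hd tl ih =>
    obtain ⟨p, c⟩ := hd
    intro h
    have hu : pvIsUpper c = false := h (p, c) (List.mem_cons_self ..)
    unfold pvVerify
    rw [hu]
    simp only [Bool.false_eq_true, if_false]
    by_cases hc : p = c
    · rw [if_neg (not_not_intro hc), if_neg (not_not_intro hc)]
      exact ih (fun pc hpc => h pc (List.mem_cons_of_mem _ hpc))
    · rw [if_pos hc, if_pos hc]

-- B's dict has the same items list as A's dict for the same shift
theorem pvDict_items_eq (s : Int) (hs : 0 ≤ s) : (pvShiftDict s).items = (pvDictB s).items := by
  unfold pvDictB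
  have hB := PySem.Dict.items_foldl_insert_fresh (PySem.List.pyRange 0 26 1)
    (fun j => String.ofList [pvChr (65 + j)])
    (fun j => String.ofList [pvChr (65 + PySem.Int.mod (j + s) 26)])
    PySem.Dict.empty (by intro a _; simp) (by decide)
  rw [hB, pvShiftDict_items]
  simp only [show PySem.Dict.empty.items = ([] : List (String × String)) from rfl,
    List.nil_append]
  apply List.map_congr_left
  intro j hj
  obtain ⟨hj0, hj26⟩ := PySem.List.mem_pyRange_one.mp hj
  have hjn : j = ((j.toNat : Nat) : Int) := by omega
  have hkey : PySem.List.pyGetD pvUppers j "" = String.ofList [pvChr (65 + j)] := by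
    rw [hjn, pvUppers_getD j.toNat (by omega)]
    unfold pvChr
    congr 2
  have hmodcast : PySem.Int.mod (j + s) 26 = (((j.toNat + s.toNat) % 26 : Nat) : Int) := by
    rw [PySem.Int.mod_eq_emod_of_pos (by norm_num : (0:Int) < 26)]
    omega
  have hval : PySem.List.pyGetD pvUppers (PySem.Int.mod (j + s) 26) ""
      = String.ofList [pvChr (65 + PySem.Int.mod (j + s) 26)] := by
    rw [hmodcast, pvUppers_getD _ (Nat.mod_lt _ (by norm_num))]
    unfold pvChr
    congr 2
  rw [hkey, hval]

-- ===== VERDICT (by name: the statement is the Claim_ definition above) =====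
theorem brute_force_shift_decoder_spec : Claim_equal_brute_force_shift_decoder := by
  intro plaintext cipher _
  unfold Spec_brute_force_shift_decoder brute_force_shift_decoder brute_force_shift_decoder_alt
  have hall : ∀ i ∈ PySem.List.pyRange 0 26 1, 0 ≤ i ∧ i < 26 :=
    fun i hi => PySem.List.mem_pyRange_one.mp hi
  by_cases hlen : plaintext.toList.length = cipher.toList.length
  case neg =>
    rw [if_pos (by rw [PySem.Str.len_eq, PySem.Str.len_eq]; exact_mod_cast hlen)]
    apply pvALoop_none
    intro i hi hd
    have := (pvDecode_eq_iff i (hall i hi).1 plaintext cipher).mp hd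
    exact hlen (by rw [← this, List.length_map])
  case pos =>
    rw [if_neg (by rw [PySem.Str.len_eq, PySem.Str.len_eq]; exact_mod_cast not_not_intro hlen)]
    have hlen' : plaintext.toList.length = cipher.toList.length := hlen
    rcases hfs : pvFindShift (plaintext.toList.zip cipher.toList) with _ | s
    · -- no shift possible: both none
      apply pvALoop_none
      intro i hi hd
      have hm := (pvDecode_eq_iff i (hall i hi).1 plaintext cipher).mp hd
      have hv := (pvVerify_iff i plaintext.toList cipher.toList hlen').mpr hm
      rw [pvFindShift_none_verify i _ hfs] at hv
      exact absurd hv (by simp)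
    · obtain ⟨hs0, hs26⟩ := pvFindShift_bounds _ s hfs
      show pvALoop plaintext cipher (PySem.List.pyRange 0 26 1)
          = if pvVerify s (plaintext.toList.zip cipher.toList) = true
            then some (pvDictB s).items else none
      by_cases hv : pvVerify s (plaintext.toList.zip cipher.toList) = true
      · rw [if_pos hv]
        rcases pvFindShift_some _ s hfs with ⟨h0, hnoup⟩ | ⟨pc, hm, hupc, hupp, hseq⟩
        · -- no uppercase letter in cipher: the loop succeeds at its first shift, 0
          subst h0
          have hd : pvDecode (pvShiftDict 0) cipher = plaintext :=
            (pvDecode_eq_iff 0 le_rfl plaintext cipher).mpr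
              ((pvVerify_iff 0 plaintext.toList cipher.toList hlen').mp hv)
          rw [show PySem.List.pyRange 0 26 1 = 0 :: PySem.List.pyRange 1 26 1 from by decide]
          unfold pvALoop
          rw [if_pos hd, pvDict_items_eq 0 le_rfl]
        · -- an uppercase pair pins the shift down uniquely
          have huniq : ∀ i ∈ PySem.List.pyRange 0 26 1,
              (pvDecode (pvShiftDict i) cipher = plaintext ↔ i = s) := by
            intro i hi
            obtain ⟨hi0, hi26⟩ := hall i hi
            constructor
            · intro hd
              have hvi := (pvVerify_iff i plaintext.toList cipher.toList hlen').mpr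
                ((pvDecode_eq_iff i hi0 plaintext cipher).mp hd)
              have := pvVerify_mem i _ hvi pc hm hupc
              rw [hseq]
              exact pvUnique i hi0 hi26 pc.1 pc.2 this
            · intro he
              subst he
              exact (pvDecode_eq_iff i hi0 plaintext cipher).mpr
                ((pvVerify_iff i plaintext.toList cipher.toList hlen').mp hv)
          rw [pvALoop_found plaintext cipher s _ huniq,
              if_pos (PySem.List.mem_pyRange_one.mpr ⟨hs0, hs26⟩), pvDict_items_eq s hs0]
      · rw [if_neg hv]
        apply pvALoop_none
        intro i hi hd
        obtain ⟨hi0, hi26⟩ := hall i hi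
        have hvi := (pvVerify_iff i plaintext.toList cipher.toList hlen').mpr
          ((pvDecode_eq_iff i hi0 plaintext cipher).mp hd)
        rcases pvFindShift_some _ s hfs with ⟨h0, hnoup⟩ | ⟨pc, hm, hupc, hupp, hseq⟩
        · rw [pvVerify_const s i _ hnoup] at hv
          exact hv hvi
        · have := pvVerify_mem i _ hvi pc hm hupc
          have hi_eq : i = s := hseq ▸ pvUnique i hi0 hi26 pc.1 pc.2 this
          subst hi_eq
          exact hv hvi
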